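-- pv_equiv track=rewrite | github.com/ZaraGiraffe/ucu_labs | lab4/lab4_task_1.py | turn_over
-- ===== SOURCE A (Python) =====
-- def turn_over(n, lst):
--     """
--     Reverse first n items of the list and return it.
--     If n < 0 that it reverses the last n items of the list.
--     if absolute value of n is more than the lenght of the list
--     returns None
--
--     >>> turn_over(4, ['f', 'o', 'o', 't', 'b', 'a', 'l', 'l'])
--     ['t', 'o', 'o', 'f', 'b', 'a', 'l', 'l']
--     >>> turn_over(-5, [1, 2, 3, 4, 5, 6, 7, 8, 9, 10])
--     [1, 2, 3, 4, 5, 10, 9, 8, 7, 6]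
--     >>> turn_over(10, [1, 2, 3, 4, 5, 6, 7, 8, 9, 10])
--     [10, 9, 8, 7, 6, 5, 4, 3, 2, 1]
--     >>> turn_over(-5, [])
--
--     """
--     if abs(n) > len(lst):
--         return None
--     neg = n < 0
--     n = abs(n)
--     if neg:
--         lst.reverse()
--     new = []
--     for i in range(n):
--         new.append(lst[i])
--     new.reverse()
--     for i in range(n):
--         lst[i] = new[i]
--     if neg:
--         lst.reverse()
--     return lst
-- ===== SOURCE B (Python) =====
-- def turn_over(n, lst):
--     if abs(n) > len(lst):
--         return None
--     if n >= 0: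
--         lst[:n] = lst[:n][::-1]
--     else:
--         lst[n:] = lst[n:][::-1]
--     return lst
-- ===== Notes on version B (the rewrite author's own statement) =====
-- stated objective: simpler
-- what changed: Replaces the temp-list copy loop, element-by-element write-back and the negative branch's reverse-whole/reverse-front/reverse-whole sandwich with one direct slice-reversal assignment on the affected segment.
import Mathlib
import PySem

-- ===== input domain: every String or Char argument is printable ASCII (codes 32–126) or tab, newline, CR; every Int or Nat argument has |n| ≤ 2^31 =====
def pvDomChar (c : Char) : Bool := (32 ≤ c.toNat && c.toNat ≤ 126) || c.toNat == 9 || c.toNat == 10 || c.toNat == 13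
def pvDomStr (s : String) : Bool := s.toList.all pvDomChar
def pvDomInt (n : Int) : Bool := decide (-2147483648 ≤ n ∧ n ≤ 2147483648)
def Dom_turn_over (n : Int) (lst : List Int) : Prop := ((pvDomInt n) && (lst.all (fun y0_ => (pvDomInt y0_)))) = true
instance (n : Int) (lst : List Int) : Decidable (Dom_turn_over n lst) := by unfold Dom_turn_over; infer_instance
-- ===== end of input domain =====

-- B replaces A's temp-copy loop, element write-back loop and the negative branch's
-- reverse-whole/reverse-front/reverse-whole sandwich with one slice-reversal assignment
-- on the affected segment (objective: simpler). Both A and B mutate lst in place in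
-- Python; the equivalence proved here is about the returned value.

-- ===== PORT A =====
def turn_over (n : Int) (lst : List Int) : Option (List Int) :=
  if n.natAbs > lst.length then none
  else
    let neg : Bool := n < 0
    let m : Nat := n.natAbs
    let l1 : List Int := if neg then lst.reverse else lst   -- lst.reverse() in place
    -- new = []; for i in range(m): new.append(lst[i])  (i < m ≤ len, so getD is exact here)
    let new : List Int := (List.range m).foldl (fun acc i => acc ++ [l1.getD i 0]) []
    let new2 : List Int := new.reverse                      -- new.reverse()
    -- for i in range(m): lst[i] = new[i]  (in range, set/getD exact here)
    let l2 : List Int := (List.range m).foldl (fun acc i => acc.set i (new2.getD i 0)) l1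
    some (if neg then l2.reverse else l2)                   -- final lst.reverse() if neg

-- ===== PORT B =====
def turn_over_alt (n : Int) (lst : List Int) : Option (List Int) :=
  if n.natAbs > lst.length then none
  else if n ≥ 0 then
    -- lst[:n] = lst[:n][::-1]
    some ((lst.take n.toNat).reverse ++ lst.drop n.toNat)
  else
    -- lst[n:] = lst[n:][::-1]  (negative index: position len - |n|, in range since |n| ≤ len)
    some (lst.take (lst.length - n.natAbs) ++ (lst.drop (lst.length - n.natAbs)).reverse)

-- ===== PRECONDITION & SPEC =====
def Spec_turn_over (n : Int) (lst : List Int) (out : Option (List Int)) : Prop := out = turn_over_alt n lst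
instance (n : Int) (lst : List Int) (out : Option (List Int)) : Decidable (Spec_turn_over n lst out) := by unfold Spec_turn_over; infer_instance

-- ===== CLAIM (what is proved, stated in full; the proofs are below) =====
def Claim_equal_turn_over : Prop := ∀ (n : Int) (lst : List Int), Dom_turn_over n lst → Spec_turn_over n lst (turn_over n lst)

-- ===== LEMMAS AND PROOFS =====

-- A's first loop builds exactly the first m elements of l.
theorem pv_copy_loop (l : List Int) (m : Nat) (hm : m ≤ l.length) :
    (List.range m).foldl (fun acc i => acc ++ [l.getD i 0]) [] = l.take m := by
  induction m with
  | zero => simp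
  | succ k ih =>
    have hk : k < l.length := by omega
    rw [List.range_succ, List.foldl_append, ih (by omega)]
    simp only [List.foldl_cons, List.foldl_nil]
    rw [List.getD_eq_getElem l 0 hk, List.take_add_one, List.getElem?_eq_getElem hk]
    rfl

-- A's write-back loop overwrites the first m slots of l with the first m elements of v.
theorem pv_set_loop (l v : List Int) (m : Nat) (hl : m ≤ l.length) (hv : m ≤ v.length) :
    (List.range m).foldl (fun acc i => acc.set i (v.getD i 0)) l = v.take m ++ l.drop m := by
  induction m with
  | zero => simp
  | succ k ih =>
    have hkl : k < l.length := by omega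
    have hkv : k < v.length := by omega
    rw [List.range_succ, List.foldl_append, ih (by omega) (by omega)]
    simp only [List.foldl_cons, List.foldl_nil]
    rw [List.set_append]
    have hlen : (v.take k).length = k := by simp; omega
    rw [hlen, if_neg (lt_irrefl k), Nat.sub_self,
        List.drop_eq_getElem_cons hkl, List.set_cons_zero,
        List.getD_eq_getElem v 0 hkv,
        List.take_add_one, List.getElem?_eq_getElem hkv, List.append_assoc]
    rfl

-- ===== VERDICT (by name: the statement is the Claim_ definition above) =====
theorem turn_over_spec : Claim_equal_turn_over := by
  intro n lst _
  unfold Spec_turn_over turn_over turn_over_alt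
  by_cases hg : n.natAbs > lst.length
  · rw [if_pos hg, if_pos hg]
  · have hg' : n.natAbs ≤ lst.length := Nat.le_of_not_lt hg
    rw [if_neg hg, if_neg hg]
    by_cases hneg : n < 0
    · -- negative branch of A; B takes its n < 0 branch
      have hb : (decide (n < 0)) = true := decide_eq_true hneg
      have hge : ¬ (n ≥ 0) := by omega
      simp only [hb, if_true, if_neg hge]
      have hlen : n.natAbs ≤ lst.reverse.length := by simpa using hg'
      rw [pv_copy_loop lst.reverse n.natAbs hlen,
          pv_set_loop lst.reverse ((lst.reverse.take n.natAbs).reverse) n.natAbs hlen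
            (by simpa using hlen)]
      have htk : (lst.reverse.take n.natAbs).reverse.take n.natAbs
          = (lst.reverse.take n.natAbs).reverse := by
        apply List.take_of_length_le; simp
      rw [htk, List.reverse_append, List.reverse_reverse,
          List.drop_reverse, List.take_reverse, List.reverse_reverse]
    · -- non-negative branch of A; B takes its n ≥ 0 branch
      have hb : (decide (n < 0)) = false := decide_eq_false hneg
      have hge : n ≥ 0 := by omega
      have htn : n.toNat = n.natAbs := by omega
      simp only [hb, if_neg Bool.false_ne_true, if_pos hge, htn]
      rw [pv_copy_loop lst n.natAbs hg',
          pv_set_loop lst ((lst.take n.natAbs).reverse) n.natAbs hg' (by simpa using hg')]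
      have htk : List.take n.natAbs (List.take n.natAbs lst).reverse
          = (List.take n.natAbs lst).reverse :=
        List.take_of_length_le (by simp)
      rw [htk]
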